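-- pv_equiv track=rewrite | github.com/Teradata/sqlalchemy-teradata | sqlalchemy_teradata/compiler.py | _visit_partition_by
-- ===== SOURCE A (Python) =====
-- def _visit_partition_by(cols, rows):
--
--     if cols:
--         c = ['column('+ k +') auto compress '\
--                         for k,v in cols.items() if v is True]
--
--         c += ['column('+ k +') no auto compress'\
--                         for k,v in cols.items() if v is False]
--
--         c += ['column('+ k +')' for k,v in cols.items() if v is None]
--
--     if rows:
--         c += ['row('+ k +') auto compress'\
--                         for k,v in rows.items() if v is True]
--
--         c += ['row('+ k +') no auto compress'\
--                         for k,v in rows.items() if v is False]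
--
--         c += ['row('+ k +')' for k,v in rows.items() if v is None]
--
--     return c
-- ===== SOURCE B (Python) =====
-- def _part(d, kw, true_suffix):
--     trues, falses, nones = [], [], []
--     for k, v in d.items():
--         s = kw + '(' + k + ')'
--         if v is True:
--             trues.append(s + true_suffix)
--         elif v is False:
--             falses.append(s + ' no auto compress')
--         elif v is None:
--             nones.append(s)
--     return trues + falses + nones
--
--
-- def _visit_partition_by(cols, rows):
--     c = _part(cols, 'column', ' auto compress ')
--     c += _part(rows, 'row', ' auto compress')
--     return c
-- ===== Notes on version B (the rewrite author's own statement) =====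
-- stated objective: simpler
-- what changed: One shared helper makes a single pass over each dict, bucketing each entry into a true/false/none list, instead of six separate list comprehensions (three passes per dict); B also returns normally when cols is empty instead of raising NameError.
-- crash fix: When cols is falsy (empty) A raises NameError because c is never initialized; B returns the row clauses (or []) there. — e.g. on _visit_partition_by([], [("r", some true)]): A raises UnboundLocalError, B returns ["row(r) auto compress"]
import Mathlib
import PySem

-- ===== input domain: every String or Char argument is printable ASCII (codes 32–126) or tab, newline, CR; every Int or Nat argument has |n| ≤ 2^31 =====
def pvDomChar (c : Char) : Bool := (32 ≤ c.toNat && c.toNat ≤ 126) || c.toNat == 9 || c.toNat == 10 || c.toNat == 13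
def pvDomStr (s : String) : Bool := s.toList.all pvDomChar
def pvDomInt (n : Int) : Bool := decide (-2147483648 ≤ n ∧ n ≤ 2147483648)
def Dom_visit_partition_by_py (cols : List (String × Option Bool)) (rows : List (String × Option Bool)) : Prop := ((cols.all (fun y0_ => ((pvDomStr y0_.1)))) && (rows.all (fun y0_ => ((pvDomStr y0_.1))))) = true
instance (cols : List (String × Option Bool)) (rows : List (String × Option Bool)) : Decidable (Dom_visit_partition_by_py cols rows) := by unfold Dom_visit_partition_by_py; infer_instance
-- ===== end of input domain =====

-- B replaces A's six list comprehensions (three passes over each dict) by one shared helper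
-- making a single bucketing pass per dict; return-value equivalence only, proved on Pre_.

-- ===== PORT A =====
-- literal transliteration of A: three comprehensions per dict, guarded by truthiness;
-- when cols is empty Python raises NameError (c unbound) — that input is outside Pre_,
-- the port returns [] there.
def visit_partition_by_py (cols : List (String × Option Bool)) (rows : List (String × Option Bool)) : List String :=
  let c : List String :=
    if !cols.isEmpty then
      (cols.filterMap fun kv => if kv.2 = some true then some ("column(" ++ kv.1 ++ ") auto compress ") else none)
      ++ (cols.filterMap fun kv => if kv.2 = some false then some ("column(" ++ kv.1 ++ ") no auto compress") else none)
      ++ (cols.filterMap fun kv => if kv.2 = none then some ("column(" ++ kv.1 ++ ")") else none)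
    else []  -- Python: NameError (outside Pre_)
  if !rows.isEmpty then
    c ++ (rows.filterMap fun kv => if kv.2 = some true then some ("row(" ++ kv.1 ++ ") auto compress") else none)
      ++ (rows.filterMap fun kv => if kv.2 = some false then some ("row(" ++ kv.1 ++ ") no auto compress") else none)
      ++ (rows.filterMap fun kv => if kv.2 = none then some ("row(" ++ kv.1 ++ ")") else none)
  else c

-- ===== PORT B =====
-- single pass over the dict, bucketing each entry into one of three lists
def pvPart (d : List (String × Option Bool)) (kw : String) (tsuf : String) : List String :=
  let acc := d.foldl (fun (acc : List String × List String × List String) kv =>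
    let s := kw ++ "(" ++ kv.1 ++ ")"
    match kv.2 with
    | some true  => (acc.1 ++ [s ++ tsuf], acc.2.1, acc.2.2)
    | some false => (acc.1, acc.2.1 ++ [s ++ " no auto compress"], acc.2.2)
    | none       => (acc.1, acc.2.1, acc.2.2 ++ [s])) ([], [], [])
  acc.1 ++ acc.2.1 ++ acc.2.2

def visit_partition_by_py_alt (cols : List (String × Option Bool)) (rows : List (String × Option Bool)) : List String :=
  let c := pvPart cols "column" " auto compress "
  c ++ pvPart rows "row" " auto compress"

-- ===== PRECONDITION & SPEC =====
-- Pre_ excludes empty cols, where A raises NameError, and dicts with duplicate keys,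
-- where the Python dict collapses entries (last value wins) and no association-list
-- port can reproduce that accidental collapse.
def Pre_visit_partition_by_py (cols : List (String × Option Bool)) (rows : List (String × Option Bool)) : Prop :=
  cols ≠ [] ∧ (cols.map Prod.fst).Nodup ∧ (rows.map Prod.fst).Nodup
instance (cols : List (String × Option Bool)) (rows : List (String × Option Bool)) : Decidable (Pre_visit_partition_by_py cols rows) := by unfold Pre_visit_partition_by_py; infer_instance
def pvWitness_visit_partition_by_py : (List (String × Option Bool)) × (List (String × Option Bool)) :=
  ([("a", some true)], [("r", none)])

-- When cols is falsy (empty) A raises NameError because c is never initialized; B returns the row clauses (or []) there.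
def Raises_visit_partition_by_py (cols : List (String × Option Bool)) (rows : List (String × Option Bool)) : Prop :=
  cols = [] ∧ (rows.map Prod.fst).Nodup
instance (cols : List (String × Option Bool)) (rows : List (String × Option Bool)) : Decidable (Raises_visit_partition_by_py cols rows) := by unfold Raises_visit_partition_by_py; infer_instance
def pvRaiseWitness_visit_partition_by_py : (List (String × Option Bool)) × (List (String × Option Bool)) :=
  ([], [("r", some true)])
def pvRaiseWitnessOut_visit_partition_by_py : List String := ["row(r) auto compress"]

def Spec_visit_partition_by_py (cols : List (String × Option Bool)) (rows : List (String × Option Bool)) (out : List String) : Prop := out = visit_partition_by_py_alt cols rows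
instance (cols : List (String × Option Bool)) (rows : List (String × Option Bool)) (out : List String) : Decidable (Spec_visit_partition_by_py cols rows out) := by unfold Spec_visit_partition_by_py; infer_instance

-- ===== CLAIM (what is proved, stated in full; the proofs are below) =====
def Claim_equal_visit_partition_by_py : Prop := ∀ (cols : List (String × Option Bool)) (rows : List (String × Option Bool)), Dom_visit_partition_by_py cols rows → Pre_visit_partition_by_py cols rows → Spec_visit_partition_by_py cols rows (visit_partition_by_py cols rows)
def Claim_raises_visit_partition_by_py : Prop := (∀ (cols : List (String × Option Bool)) (rows : List (String × Option Bool)), Dom_visit_partition_by_py cols rows → Raises_visit_partition_by_py cols rows → ¬ Pre_visit_partition_by_py cols rows) ∧ (Dom_visit_partition_by_py (pvRaiseWitness_visit_partition_by_py.1) (pvRaiseWitness_visit_partition_by_py.2) ∧ Raises_visit_partition_by_py (pvRaiseWitness_visit_partition_by_py.1) (pvRaiseWitness_visit_partition_by_py.2) ∧ visit_partition_by_py_alt (pvRaiseWitness_visit_partition_by_py.1) (pvRaiseWitness_visit_partition_by_py.2) = pvRaiseWitnessOut_visit_partition_by_py)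

-- ===== LEMMAS AND PROOFS =====

-- invariant of B's single bucketing pass
theorem pvPart_fold (d : List (String × Option Bool)) (kw tsuf : String)
    (t f n : List String) :
    d.foldl (fun (acc : List String × List String × List String) kv =>
      let s := kw ++ "(" ++ kv.1 ++ ")"
      match kv.2 with
      | some true  => (acc.1 ++ [s ++ tsuf], acc.2.1, acc.2.2)
      | some false => (acc.1, acc.2.1 ++ [s ++ " no auto compress"], acc.2.2)
      | none       => (acc.1, acc.2.1, acc.2.2 ++ [s])) (t, f, n)
    = (t ++ (d.filterMap fun kv => if kv.2 = some true then some (kw ++ "(" ++ kv.1 ++ ")" ++ tsuf) else none),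
       f ++ (d.filterMap fun kv => if kv.2 = some false then some (kw ++ "(" ++ kv.1 ++ ")" ++ " no auto compress") else none),
       n ++ (d.filterMap fun kv => if kv.2 = none then some (kw ++ "(" ++ kv.1 ++ ")") else none)) := by
  induction d generalizing t f n with
  | nil => simp
  | cons kv d ih =>
    obtain ⟨k, v⟩ := kv
    cases v with
    | none => simp [List.foldl_cons, ih]
    | some b => cases b <;> simp [List.foldl_cons, ih]

theorem pvPart_eq (d : List (String × Option Bool)) (kw tsuf : String) :
    pvPart d kw tsuf
    = (d.filterMap fun kv => if kv.2 = some true then some (kw ++ "(" ++ kv.1 ++ ")" ++ tsuf) else none)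
      ++ (d.filterMap fun kv => if kv.2 = some false then some (kw ++ "(" ++ kv.1 ++ ")" ++ " no auto compress") else none)
      ++ (d.filterMap fun kv => if kv.2 = none then some (kw ++ "(" ++ kv.1 ++ ")") else none) := by
  unfold pvPart
  rw [pvPart_fold]
  simp [List.append_assoc]

-- literal-concatenation facts used to align A's string literals with B's pieces
theorem pvLitCol : ("column" : String) ++ "(" = "column(" := by decide
theorem pvLitRow : ("row" : String) ++ "(" = "row(" := by decide
theorem pvLitAcSp : (")" : String) ++ " auto compress " = ") auto compress " := by decide
theorem pvLitAc : (")" : String) ++ " auto compress" = ") auto compress" := by decide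
theorem pvLitNac : (")" : String) ++ " no auto compress" = ") no auto compress" := by decide

-- ===== VERDICT (by name: the statement is the Claim_ definition above) =====
theorem visit_partition_by_py_spec : Claim_equal_visit_partition_by_py := by
  intro cols rows _ hpre
  obtain ⟨hc, -, -⟩ := hpre
  unfold Spec_visit_partition_by_py visit_partition_by_py visit_partition_by_py_alt
  rw [pvPart_eq, pvPart_eq]
  have hcne : (!cols.isEmpty) = true := by
    simp; exact hc
  rw [hcne]
  simp only [if_true]
  by_cases hr : rows = []
  · subst hr
    simp [String.append_assoc, pvLitCol, pvLitAcSp, pvLitNac]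
  · have hrne : (!rows.isEmpty) = true := by
      simp; exact hr
    rw [hrne]
    simp [String.append_assoc, pvLitCol, pvLitRow, pvLitAcSp, pvLitAc, pvLitNac, List.append_assoc]

@[simp] theorem visit_partition_by_py_raises : Claim_raises_visit_partition_by_py := by
  unfold Claim_raises_visit_partition_by_py
  constructor
  · intro cols rows _ hr hp
    exact hp.1 hr.1
  · exact ⟨by decide, by decide, by decide⟩
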